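-- pv_equiv track=rewrite | github.com/gahyoenj/baekjoon | 프로그래머스/1/155652. 둘만의 암호/둘만의 암호.py | solution
-- ===== SOURCE A (Python) =====
-- def solution(s, skip, index):
--     answer = ''
--     for alphabet in s:
--         cnt = 0
--         idx = ord(alphabet)
--
--         while cnt < index:
--             idx += 1
--
--             if idx > 122:
--                 idx = 97
--
--             if chr(idx) in skip:
--                 continue
--
--             cnt += 1
--
--         answer += chr(idx)
--     return answer
-- ===== SOURCE B (Python) =====
-- def solution(s, skip, index):
--     skipcodes = {ord(ch) for ch in skip}
--     cyc = [c for c in range(97, 123) if c not in skipcodes]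
--     out = []
--     for ch in s:
--         if index <= 0:
--             out.append(ch)
--             continue
--         start = ord(ch)
--         pref = [c for c in range(start + 1, 123) if c not in skipcodes]
--         if index <= len(pref):
--             out.append(chr(pref[index - 1]))
--         else:
--             out.append(chr(cyc[(index - len(pref) - 1) % len(cyc)]))
--     return ''.join(out)
-- ===== Notes on version B (the rewrite author's own statement) =====
-- stated objective: faster
-- what changed: A walks the character range one code at a time for every letter (index iterations per character, each with a substring membership test); B precomputes the set of skip codes and the filtered cycle of valid lowercase codes once and answers each character in closed form by indexing the filtered prefix list or the cycle at (index - len(prefix) - 1) mod len(cycle).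
import Mathlib
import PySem

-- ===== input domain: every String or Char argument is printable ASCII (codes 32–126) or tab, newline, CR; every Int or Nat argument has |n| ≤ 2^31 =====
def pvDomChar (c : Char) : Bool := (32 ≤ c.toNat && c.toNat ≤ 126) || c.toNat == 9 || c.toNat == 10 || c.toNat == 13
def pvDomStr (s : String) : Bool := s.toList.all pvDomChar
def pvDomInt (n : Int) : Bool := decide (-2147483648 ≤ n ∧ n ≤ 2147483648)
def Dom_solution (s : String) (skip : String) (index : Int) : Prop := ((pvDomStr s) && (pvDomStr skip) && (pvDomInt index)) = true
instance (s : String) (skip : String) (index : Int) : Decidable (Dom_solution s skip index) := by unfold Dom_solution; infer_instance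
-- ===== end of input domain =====

-- B replaces A's per-character step-by-step walk by one precomputed filtered cycle of
-- valid codes and closed-form modular indexing per character (measurably faster).

-- ===== PORT A =====
-- one `idx += 1; if idx > 122: idx = 97` step of A's while loop
def pvStepIdx (idx : Int) : Int := if idx + 1 > 122 then 97 else idx + 1

-- `chr(idx) in skip`: a single-character substring test is character membership (exact)
def pvInSkip (skip : List Char) (idx : Int) : Bool := skip.contains (Char.ofNat idx.toNat)

-- A's `while cnt < index` loop; the fuel 123 + 26*(index+1) covers every terminating
-- run of the Python loop (pvLoopA_eq below is applied with far fewer steps), so on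
-- Pre_solution this is exact.
def pvLoopA (skip : List Char) (index : Int) : Nat → Int → Int → Int
  | 0, _, idx => idx
  | fuel+1, cnt, idx =>
    if cnt < index then
      let i := pvStepIdx idx
      if pvInSkip skip i then pvLoopA skip index fuel cnt i
      else pvLoopA skip index fuel (cnt+1) i
    else idx

def solution (s : String) (skip : String) (index : Int) : String :=
  s.toList.foldl (fun answer c =>
    answer ++ String.ofList
      [Char.ofNat (pvLoopA skip.toList index (123 + 26 * (index.toNat + 1)) 0 (c.toNat : Int)).toNat]) ""

-- ===== PORT B =====
def solution_alt (s : String) (skip : String) (index : Int) : String :=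
  let skipcodes : PySem.Set Int := PySem.Set.ofList (skip.toList.map (fun ch => (ch.toNat : Int)))
  let cyc : List Int := (PySem.List.pyRange 97 123 1).filter (fun c => !(PySem.Set.contains skipcodes c))
  String.ofList (s.toList.map (fun ch =>
    if index ≤ 0 then ch
    else
      let pref : List Int :=
        (PySem.List.pyRange ((ch.toNat : Int) + 1) 123 1).filter (fun c => !(PySem.Set.contains skipcodes c))
      if index ≤ (pref.length : Int) then
        Char.ofNat (PySem.List.pyGetD pref (index - 1) 0).toNat
      else
        Char.ofNat (PySem.List.pyGetD cyc
          (PySem.Int.mod (index - (pref.length : Int) - 1) (cyc.length : Int)) 0).toNat))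

-- ===== PRECONDITION & SPEC =====
-- Pre_ excludes exactly the inputs on which A's while loop never terminates: a positive
-- index with every lowercase letter in skip and some character of s whose strictly-above
-- run of non-skip codes up to 122 is shorter than index (there A diverges and B raises
-- ZeroDivisionError; on every input where A returns, Pre_ holds).
def Pre_solution (s : String) (skip : String) (index : Int) : Prop :=
  index ≤ 0 ∨
  (∃ n ∈ List.range' 97 26, Char.ofNat n ∉ skip.toList) ∨
  (∀ c ∈ s.toList,
    index ≤ (((List.range' (c.toNat + 1) (122 - c.toNat)).filter
      (fun p => Char.ofNat p ∉ skip.toList)).length : Int))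
instance (s : String) (skip : String) (index : Int) : Decidable (Pre_solution s skip index) := by
  unfold Pre_solution; infer_instance

def pvWitness_solution : String × String × Int := ("ab", "cd", 3)

def Spec_solution (s : String) (skip : String) (index : Int) (out : String) : Prop := out = solution_alt s skip index
instance (s : String) (skip : String) (index : Int) (out : String) : Decidable (Spec_solution s skip index out) := by unfold Spec_solution; infer_instance

-- ===== CLAIM (what is proved, stated in full; the proofs are below) =====
def Claim_equal_solution : Prop := ∀ (s : String) (skip : String) (index : Int), Dom_solution s skip index → Pre_solution s skip index → Spec_solution s skip index (solution s skip index)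

-- ===== LEMMAS AND PROOFS =====

-- the list of idx values visited by n steps of A's walk, and the final position
def pvChain : Int → Nat → List Int
  | _, 0 => []
  | idx, n+1 => pvStepIdx idx :: pvChain (pvStepIdx idx) n

def pvEnd : Int → Nat → Int
  | idx, 0 => idx
  | idx, n+1 => pvEnd (pvStepIdx idx) n

-- the ascending integer range [a, a+k)
def pvIRange : Int → Nat → List Int
  | _, 0 => []
  | a, k+1 => a :: pvIRange (a+1) k

-- code p is not skipped (the filter B and the characterisation of A share)
def pvNS (sk : List Char) (p : Int) : Bool := !pvInSkip sk p

-- the filtered cycle of valid lowercase codes, and the filtered prefix above a start code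
def pvCyc (sk : List Char) : List Int := (pvIRange 97 26).filter (pvNS sk)
def pvPref (sk : List Char) (start : Int) : List Int :=
  (pvIRange (start + 1) (122 - start).toNat).filter (pvNS sk)

lemma pvLoopA_stop (sk : List Char) (index : Int) (fuel : Nat) (cnt idx : Int)
    (h : ¬ cnt < index) : pvLoopA sk index fuel cnt idx = idx := by
  cases fuel <;> simp [pvLoopA, h]

lemma pvLoopA_eq (sk : List Char) (index : Int) :
    ∀ (n fuel : Nat) (cnt idx : Int), n ≤ fuel → cnt < index →
    index - cnt ≤ (((pvChain idx n).filter (fun p => !pvInSkip sk p)).length : Int) →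
    pvLoopA sk index fuel cnt idx
      = ((pvChain idx n).filter (fun p => !pvInSkip sk p)).getD (index - cnt - 1).toNat 0 := by
  intro n
  induction n with
  | zero =>
    intro fuel cnt idx _ hlt hcount
    simp [pvChain] at hcount; omega
  | succ n ih =>
    intro fuel cnt idx hf hlt hcount
    obtain ⟨f, rfl⟩ : ∃ f, fuel = f + 1 := ⟨fuel - 1, by omega⟩
    rw [pvLoopA, if_pos hlt]
    simp only [pvChain] 
    simp only [pvChain] at hcount
    by_cases hs : pvInSkip sk (pvStepIdx idx)
    · rw [if_pos hs]
      rw [List.filter_cons_of_neg (by simp [hs])] at hcount ⊢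
      exact ih f cnt (pvStepIdx idx) (by omega) hlt hcount
    · rw [if_neg hs]
      rw [List.filter_cons_of_pos (by simp [hs])] at hcount ⊢
      by_cases h2 : cnt + 1 < index
      · rw [ih f (cnt+1) (pvStepIdx idx) (by omega) h2
          (by simp at hcount ⊢; omega)]
        have : (index - cnt - 1).toNat = (index - (cnt+1) - 1).toNat + 1 := by omega
        rw [this, List.getD_cons_succ]
      · rw [pvLoopA_stop sk index f (cnt+1) (pvStepIdx idx) h2]
        have : (index - cnt - 1).toNat = 0 := by omega
        rw [this, List.getD_cons_zero]
lemma pvChain_append (idx : Int) (a b : Nat) :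
    pvChain idx (a + b) = pvChain idx a ++ pvChain (pvEnd idx a) b := by
  induction a generalizing idx with
  | zero => simp [pvChain, pvEnd]
  | succ a ih => rw [Nat.succ_add]; simp [pvChain, pvEnd, ih]
lemma pvEnd_append (idx : Int) (a b : Nat) : pvEnd idx (a + b) = pvEnd (pvEnd idx a) b := by
  induction a generalizing idx with
  | zero => simp [pvEnd]
  | succ a ih => rw [Nat.succ_add]; simp [pvEnd, ih]

lemma pvChain_up (k : Nat) : ∀ (idx : Int), idx + k = 122 →
    pvChain idx k = pvIRange (idx + 1) k ∧ pvEnd idx k = 122 := by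
  induction k with
  | zero => intro idx h; refine ⟨by simp [pvChain, pvIRange], by simp [pvEnd]; omega⟩
  | succ k ih =>
    intro idx h
    have hstep : pvStepIdx idx = idx + 1 := by unfold pvStepIdx; rw [if_neg (by omega)]
    obtain ⟨h1, h2⟩ := ih (idx + 1) (by omega)
    refine ⟨?_, ?_⟩
    · rw [pvChain, hstep, h1, pvIRange]
    · rw [pvEnd, hstep, h2]

lemma pvChain_ge (idx : Int) (h : 122 ≤ idx) (n : Nat) : pvChain idx n = pvChain 122 n := by
  cases n with
  | zero => rfl
  | succ n =>
    have h1 : pvStepIdx idx = 97 := by unfold pvStepIdx; rw [if_pos (by omega)]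
    have h2 : pvStepIdx (122:Int) = 97 := by decide
    rw [pvChain, pvChain, h1, h2]

lemma pvChain_26 : pvChain 122 26 = pvIRange 97 26 ∧ pvEnd 122 26 = 122 := by decide

lemma pvChain_cycles (q : Nat) :
    pvChain 122 (26 * q) = (List.replicate q (pvIRange 97 26)).flatten ∧ pvEnd 122 (26 * q) = 122 := by
  induction q with
  | zero => simp [pvChain, pvEnd]
  | succ q ih =>
    have h26 : 26 * (q + 1) = 26 + 26 * q := by ring
    rw [h26, pvChain_append, pvEnd_append, pvChain_26.1, pvChain_26.2, ih.1, ih.2]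
    constructor
    · rw [List.replicate_succ, List.flatten_cons]
    · rfl

lemma pvChain_decomp (start : Int) (h : 0 ≤ start) (q : Nat) :
    pvChain start ((122 - start).toNat + 26 * q)
      = pvIRange (start + 1) (122 - start).toNat ++ (List.replicate q (pvIRange 97 26)).flatten := by
  by_cases hle : start ≤ 122
  · have hP : start + ((122 - start).toNat : Int) = 122 := by omega
    rw [pvChain_append, (pvChain_up _ _ hP).1, (pvChain_up _ _ hP).2, (pvChain_cycles q).1]
  · have hP : (122 - start).toNat = 0 := by omega
    rw [hP]
    simp only [Nat.zero_add]
    rw [pvChain_ge start (by omega), (pvChain_cycles q).1]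
    rfl

lemma flatten_replicate_getD {α : Type} [Inhabited α] (l : List α) (d : α) :
    ∀ (q j : Nat), j < q * l.length →
    ((List.replicate q l).flatten).getD j d = l.getD (j % l.length) d := by
  intro q
  induction q with
  | zero => intro j h; omega
  | succ q ih =>
    intro j h
    rw [List.replicate_succ, List.flatten_cons]
    by_cases hj : j < l.length
    · rw [List.getD_eq_getElem?_getD, List.getElem?_append_left hj, Nat.mod_eq_of_lt hj,
        ← List.getD_eq_getElem?_getD]
    · have hlen : 0 < l.length := by
        rcases Nat.eq_zero_or_pos l.length with h0 | h0
        · rw [h0, Nat.mul_zero] at h; omega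
        · exact h0
      rw [Nat.succ_mul] at h
      rw [List.getD_eq_getElem?_getD, List.getElem?_append_right (by omega),
        ← List.getD_eq_getElem?_getD, ih (j - l.length) (by omega)]
      conv_rhs => rw [Nat.mod_eq_sub_mod (show l.length ≤ j by omega)]

lemma pvIRange_eq_pyRange (a : Int) (k : Nat) : pvIRange a k = PySem.List.pyRange a (a + k) 1 := by
  induction k generalizing a with
  | zero => rw [PySem.List.pyRange_one_eq_nil (by omega)]; rfl
  | succ k ih =>
    rw [PySem.List.pyRange_one_cons (by omega), pvIRange, ih]
    congr 1
    · congr 1; push_cast; ring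
lemma mem_pvIRange (a x : Int) (k : Nat) : x ∈ pvIRange a k ↔ a ≤ x ∧ x < a + k := by
  rw [pvIRange_eq_pyRange, PySem.List.mem_pyRange_one]

-- membership in the skip-code set agrees with A's character test on codes 0..126
lemma skipset_eq (sk : List Char) (p : Int) (h0 : 0 ≤ p) (h1 : p ≤ 126) :
    PySem.Set.contains (PySem.Set.ofList (sk.map (fun ch => (ch.toNat : Int)))) p
      = pvInSkip sk p := by
  have hvalid : p.toNat.isValidChar := by unfold Nat.isValidChar; omega
  rw [Bool.eq_iff_iff, PySem.Set.contains_iff, PySem.Set.mem_ofList, pvInSkip]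
  simp only [List.mem_map, List.contains_iff_mem]
  constructor
  · rintro ⟨ch, hch, rfl⟩
    simpa [Char.ofNat_toNat] using hch
  · intro hmem
    refine ⟨Char.ofNat p.toNat, hmem, ?_⟩
    have : (Char.ofNat p.toNat).toNat = p.toNat := by simp [Char.ofNat, hvalid]
    omega

lemma pref_bridge (sk : List Char) (start : Int) (h0 : 0 ≤ start) :
    (PySem.List.pyRange (start + 1) 123 1).filter
      (fun c => !(PySem.Set.contains (PySem.Set.ofList (sk.map (fun ch => (ch.toNat : Int)))) c))
    = pvPref sk start := by
  unfold pvPref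
  by_cases hle : start ≤ 122
  · have : PySem.List.pyRange (start + 1) 123 1 = pvIRange (start + 1) (122 - start).toNat := by
      rw [pvIRange_eq_pyRange]
      congr 1
      omega
    rw [this]
    apply List.filter_congr
    intro x hx
    rw [mem_pvIRange] at hx
    rw [pvNS, skipset_eq sk x (by omega) (by omega)]
  · rw [PySem.List.pyRange_one_eq_nil (by omega)]
    have : (122 - start).toNat = 0 := by omega
    rw [this]
    rfl

lemma cyc_bridge (sk : List Char) :
    (PySem.List.pyRange 97 123 1).filter
      (fun c => !(PySem.Set.contains (PySem.Set.ofList (sk.map (fun ch => (ch.toNat : Int)))) c))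
    = pvCyc sk := by
  unfold pvCyc
  have : PySem.List.pyRange 97 123 1 = pvIRange 97 26 := by
    rw [pvIRange_eq_pyRange]; norm_num
  rw [this]
  apply List.filter_congr
  intro x hx
  rw [mem_pvIRange] at hx
  rw [pvNS, skipset_eq sk x (by omega) (by omega)]

lemma length_flatten_replicate (q : Nat) (l : List Int) :
    ((List.replicate q l).flatten).length = q * l.length := by
  simp [List.length_flatten, List.map_replicate, List.sum_replicate]

-- the per-character equivalence
lemma char_eq (sk : List Char) (index : Int) (c : Char)
    (hOr : index ≤ 0 ∨ 0 < (pvCyc sk).length ∨ index ≤ ((pvPref sk (c.toNat : Int)).length : Int)) :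
    Char.ofNat (pvLoopA sk index (123 + 26 * (index.toNat + 1)) 0 (c.toNat : Int)).toNat
      = (if index ≤ 0 then c
         else if index ≤ ((pvPref sk (c.toNat : Int)).length : Int) then
           Char.ofNat (PySem.List.pyGetD (pvPref sk (c.toNat : Int)) (index - 1) 0).toNat
         else
           Char.ofNat (PySem.List.pyGetD (pvCyc sk)
             (PySem.Int.mod (index - ((pvPref sk (c.toNat : Int)).length : Int) - 1)
               ((pvCyc sk).length : Int)) 0).toNat) := by
  set start : Int := (c.toNat : Int) with hstart
  by_cases hi : index ≤ 0
  · rw [if_pos hi, pvLoopA_stop sk index _ 0 start (by omega)]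
    have : start.toNat = c.toNat := by omega
    rw [this, Char.ofNat_toNat]
  · rw [if_neg hi]
    have hipos : 0 < index := by omega
    set q : Nat := index.toNat with hq
    set P : Nat := (122 - start).toNat with hP
    set m : Nat := (pvCyc sk).length with hm
    have hstart0 : (0:Int) ≤ start := by positivity
    have hP122 : P ≤ 122 := by omega
    -- the filtered chain
    have hchain : (pvChain start (P + 26 * q)).filter (pvNS sk)
        = pvPref sk start ++ (List.replicate q (pvCyc sk)).flatten := by
      rw [pvChain_decomp start hstart0 q, List.filter_append, List.filter_flatten,
        List.map_replicate]
      rfl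
    have hlen : ((pvChain start (P + 26 * q)).filter (pvNS sk)).length
        = (pvPref sk start).length + q * m := by
      rw [hchain, List.length_append, length_flatten_replicate]
    have hcount : index - 0 ≤ (((pvChain start (P + 26*q)).filter (pvNS sk)).length : Int) := by
      rw [hlen]
      rcases hOr with h | h | h
      · omega
      · have : q ≤ q * m := Nat.le_mul_of_pos_right q h
        push_cast
        omega
      · push_cast at h ⊢
        omega
    have hA := pvLoopA_eq sk index (P + 26*q) (123 + 26 * (index.toNat + 1)) 0 start
      (by omega) hipos hcount
    rw [show (fun p => !pvInSkip sk p) = pvNS sk from rfl] at hA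
    rw [hA, hchain]
    set j : Nat := (index - 0 - 1).toNat with hj
    by_cases hpre : index ≤ ((pvPref sk start).length : Int)
    · rw [if_pos hpre]
      have hjlt : j < (pvPref sk start).length := by omega
      rw [List.getD_eq_getElem?_getD, List.getElem?_append_left hjlt, ← List.getD_eq_getElem?_getD]
      rw [PySem.List.pyGetD_eq_getElem (pvPref sk start) 0 (by omega) (by omega)]
      rw [List.getD_eq_getElem _ _ hjlt]
      have he : (index - 1).toNat = j := by omega
      simp only [he]
    · rw [if_neg hpre]
      have hm0 : 0 < m := by
        rcases hOr with h | h | h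
        · omega
        · exact h
        · omega
      set L : Nat := (pvPref sk start).length with hL
      have hjge : L ≤ j := by omega
      have hjq : j - L < q * m := by
        have h1 : j < q := by omega
        have h2 : q ≤ q * m := Nat.le_mul_of_pos_right q hm0
        omega
      rw [List.getD_eq_getElem?_getD, List.getElem?_append_right hjge, ← List.getD_eq_getElem?_getD]
      rw [flatten_replicate_getD _ _ q (j - L) hjq]
      -- B side
      have hmod : PySem.Int.mod (index - (L : Int) - 1) ((m : Int))
          = (((j - L) % m : Nat) : Int) := by
        rw [PySem.Int.mod_eq_emod_of_pos (by exact_mod_cast hm0)]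
        have : index - (L : Int) - 1 = (((j - L : Nat)) : Int) := by omega
        rw [this]
        push_cast
        ring
      rw [hmod, PySem.List.pyGetD_natCast]

lemma foldl_str (f : Char → Char) (l : List Char) : ∀ acc : String,
    l.foldl (fun ans c => ans ++ String.ofList [f c]) acc = acc ++ String.ofList (l.map f) := by
  induction l with
  | nil => intro acc; simp
  | cons a l ih =>
    intro acc
    rw [List.foldl_cons, ih, String.append_assoc, ← String.ofList_append]
    rfl

lemma alt_restate (s skip : String) (index : Int) :
    solution_alt s skip index = String.ofList (s.toList.map (fun c =>
      if index ≤ 0 then c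
      else if index ≤ ((pvPref skip.toList (c.toNat : Int)).length : Int) then
        Char.ofNat (PySem.List.pyGetD (pvPref skip.toList (c.toNat : Int)) (index - 1) 0).toNat
      else
        Char.ofNat (PySem.List.pyGetD (pvCyc skip.toList)
          (PySem.Int.mod (index - ((pvPref skip.toList (c.toNat : Int)).length : Int) - 1)
            ((pvCyc skip.toList).length : Int)) 0).toNat)) := by
  unfold solution_alt
  refine congrArg String.ofList (List.map_congr_left ?_)
  intro c _
  rw [cyc_bridge, pref_bridge skip.toList _ (by positivity)]

lemma a_restate (s skip : String) (index : Int) :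
    solution s skip index = String.ofList (s.toList.map (fun c =>
      Char.ofNat (pvLoopA skip.toList index (123 + 26 * (index.toNat + 1)) 0 (c.toNat : Int)).toNat)) := by
  unfold solution
  rw [foldl_str]
  simp

lemma cyc_pos (sk : List Char) (h : ∃ n ∈ List.range' 97 26, Char.ofNat n ∉ sk) :
    0 < (pvCyc sk).length := by
  obtain ⟨n, hn, hns⟩ := h
  rw [List.mem_range'_1] at hn
  apply List.length_pos_of_mem (a := (n : Int))
  rw [pvCyc, List.mem_filter, mem_pvIRange]
  refine ⟨⟨by omega, by omega⟩, ?_⟩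
  simp only [pvNS, pvInSkip, Int.toNat_natCast, Bool.not_eq_true']
  simpa using hns

lemma pvIRange_natCast (a k : Nat) : pvIRange (a : Int) k = (List.range' a k).map (fun n => Int.ofNat n) := by
  induction k generalizing a with
  | zero => rfl
  | succ k ih =>
    rw [List.range'_succ, pvIRange]
    have h : ((a : Int) + 1) = ((a + 1 : Nat) : Int) := by push_cast; ring
    rw [h, ih]
    rfl

lemma filter_len_bridge (sk : List Char) (l : List Nat) :
    (l.filter (fun p => Char.ofNat p ∉ sk)).length
      = ((l.map (fun n => Int.ofNat n)).filter (pvNS sk)).length := by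
  induction l with
  | nil => rfl
  | cons a l ih =>
    rw [List.map_cons, List.filter_cons, List.filter_cons]
    have h0 : pvNS sk (Int.ofNat a) = decide (Char.ofNat a ∉ sk) := by
      simp [pvNS, pvInSkip]
    rw [h0]
    by_cases h : Char.ofNat a ∉ sk
    · rw [if_pos (by simpa using h), if_pos (by simp [h])]
      rw [List.length_cons, List.length_cons, ih]
    · rw [if_neg (by simpa using h), if_neg (by simp at h; simp [h])]
      exact ih

lemma pref_len (sk : List Char) (c : Char) :
    ((List.range' (c.toNat + 1) (122 - c.toNat)).filter
      (fun p => Char.ofNat p ∉ sk)).length = (pvPref sk (c.toNat : Int)).length := by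
  unfold pvPref
  have h1 : (122 - (c.toNat : Int)).toNat = 122 - c.toNat := by omega
  have h2 : ((c.toNat : Int) + 1) = ((c.toNat + 1 : Nat) : Int) := by push_cast; ring
  rw [h1, h2, pvIRange_natCast]
  exact filter_len_bridge sk _


-- ===== VERDICT (by name: the statement is the Claim_ definition above) =====
theorem solution_spec : Claim_equal_solution := by
  intro s skip index _ hpre
  unfold Spec_solution
  rw [a_restate, alt_restate]
  refine congrArg String.ofList (List.map_congr_left ?_)
  intro c hc
  apply char_eq
  unfold Pre_solution at hpre
  rcases hpre with h | h | h
  · exact Or.inl h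
  · exact Or.inr (Or.inl (cyc_pos skip.toList h))
  · refine Or.inr (Or.inr ?_)
    have hh := h c hc
    rwa [pref_len skip.toList c] at hh
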